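-- pv_equiv track=rewrite | github.com/enigmAsad/ticketing-service | src/ticketing_service/main.py | _available_seats_page
-- ===== SOURCE A (Python) =====
-- def _available_seats_page(
--     total_seats: int,
--     booked_set: set[int],
--     offset: int,
--     limit: int,
-- ) -> list[int]:
--     results: list[int] = []
--     skipped = 0
--     for seat_number in range(1, total_seats + 1):
--         if seat_number in booked_set:
--             continue
--         if skipped < offset:
--             skipped += 1
--             continue
--         results.append(seat_number)
--         if len(results) >= limit:
--             break
--     return results
-- ===== SOURCE B (Python) =====
-- def _available_seats_page(
--     total_seats: int,
--     booked_set: set[int],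
--     offset: int,
--     limit: int,
-- ) -> list[int]:
--     # Walk the gaps between sorted booked seats instead of scanning every seat.
--     booked = sorted(b for b in booked_set if 1 <= b <= total_seats)
--     booked.append(total_seats + 1)  # sentinel closing the last gap
--     results: list[int] = []
--     to_skip = offset if offset > 0 else 0
--     prev = 0
--     for b in booked:
--         gap = b - prev - 1  # number of free seats strictly between prev and b
--         if gap <= to_skip:
--             to_skip -= gap
--         else:
--             for s in range(prev + 1 + to_skip, b):
--                 results.append(s)
--                 if len(results) >= limit:
--                     return results
--             to_skip = 0
--         prev = b
--     return results
-- ===== Notes on version B (the rewrite author's own statement) =====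
-- stated objective: alternative
-- what changed: Instead of scanning every seat 1..total_seats and testing set membership per seat, B sorts the booked seats once and walks the gaps between consecutive booked seats, skipping whole gaps arithmetically for the offset and emitting only free seats.
import Mathlib
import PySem

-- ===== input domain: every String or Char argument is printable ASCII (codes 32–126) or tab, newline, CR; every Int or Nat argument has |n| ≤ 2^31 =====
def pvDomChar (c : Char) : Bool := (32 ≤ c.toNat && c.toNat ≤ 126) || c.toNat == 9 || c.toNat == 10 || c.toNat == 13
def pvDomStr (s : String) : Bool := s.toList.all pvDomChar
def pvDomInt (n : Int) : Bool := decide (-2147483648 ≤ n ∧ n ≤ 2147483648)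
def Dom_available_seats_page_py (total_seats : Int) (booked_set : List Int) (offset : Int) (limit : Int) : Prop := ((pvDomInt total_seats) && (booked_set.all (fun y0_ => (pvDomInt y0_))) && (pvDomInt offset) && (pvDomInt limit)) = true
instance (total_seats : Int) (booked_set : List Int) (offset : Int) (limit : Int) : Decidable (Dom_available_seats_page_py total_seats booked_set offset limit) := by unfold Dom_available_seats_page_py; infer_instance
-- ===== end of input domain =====

-- B replaces A's per-seat scan of the seat range by sorting the booked seats and walking the
-- gaps between them (objective: alternative algorithm, same observable behaviour).

-- ===== PORT A =====
-- the for-loop of A over the lazy range(1, total_seats+1): seat is the loop counter,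
-- state = (skipped, results); break returns results immediately
def pvALoop (booked_set : List Int) (offset limit stop : Int)
    (seat skipped : Int) (results : List Int) : List Int :=
  if h : seat < stop then
    if seat ∈ booked_set then pvALoop booked_set offset limit stop (seat + 1) skipped results
    else if skipped < offset then pvALoop booked_set offset limit stop (seat + 1) (skipped + 1) results
    else
      let results' := results ++ [seat]
      if limit ≤ (results'.length : Int) then results'
      else pvALoop booked_set offset limit stop (seat + 1) skipped results'
  else results
termination_by (stop - seat).toNat
decreasing_by all_goals omega

def available_seats_page_py (total_seats : Int) (booked_set : List Int) (offset : Int) (limit : Int) : List Int :=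
  pvALoop booked_set offset limit (total_seats + 1) 1 0 []

-- ===== PORT B =====
-- inner for-loop of B over the lazy range(prev+1+to_skip, b): returns (results, broke)
def pvBEmit (limit b : Int) (s : Int) (results : List Int) : List Int × Bool :=
  if h : s < b then
    let results' := results ++ [s]
    if limit ≤ (results'.length : Int) then (results', true)
    else pvBEmit limit b (s + 1) results'
  else (results, false)
termination_by (b - s).toNat
decreasing_by omega

-- outer for-loop of B over the sorted booked seats plus the sentinel total_seats+1
def pvBLoop (limit : Int) : List Int → Int → Int → List Int → List Int
  | [], _, _, results => results
  | b :: rest, prev, to_skip, results =>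
    let gap := b - prev - 1
    if gap ≤ to_skip then pvBLoop limit rest b (to_skip - gap) results
    else
      let p := pvBEmit limit b (prev + 1 + to_skip) results
      if p.2 then p.1 else pvBLoop limit rest b 0 p.1

def available_seats_page_py_alt (total_seats : Int) (booked_set : List Int) (offset : Int) (limit : Int) : List Int :=
  let booked := PySem.List.sorted (booked_set.filter (fun b => decide (1 ≤ b ∧ b ≤ total_seats))) (fun x => x) false
  pvBLoop limit (booked ++ [total_seats + 1]) 0 (if 0 < offset then offset else 0) []

-- ===== PRECONDITION & SPEC =====
-- booked_set ports a Python set[int], whose element list is duplicate-free by the type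
-- convention; Pre_ states exactly that representational invariant (on lists with duplicates
-- B's gap arithmetic over the sorted list miscounts, a shape no Python set produces).
def Pre_available_seats_page_py (total_seats : Int) (booked_set : List Int) (offset : Int) (limit : Int) : Prop :=
  booked_set.Nodup
instance (total_seats : Int) (booked_set : List Int) (offset : Int) (limit : Int) : Decidable (Pre_available_seats_page_py total_seats booked_set offset limit) := by unfold Pre_available_seats_page_py; infer_instance

def pvWitness_available_seats_page_py : Int × List Int × Int × Int := (6, [2, 5], 1, 2)

def Spec_available_seats_page_py (total_seats : Int) (booked_set : List Int) (offset : Int) (limit : Int) (out : List Int) : Prop := out = available_seats_page_py_alt total_seats booked_set offset limit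
instance (total_seats : Int) (booked_set : List Int) (offset : Int) (limit : Int) (out : List Int) : Decidable (Spec_available_seats_page_py total_seats booked_set offset limit out) := by unfold Spec_available_seats_page_py; infer_instance

-- ===== CLAIM (what is proved, stated in full; the proofs are below) =====
def Claim_equal_available_seats_page_py : Prop := ∀ (total_seats : Int) (booked_set : List Int) (offset : Int) (limit : Int), Dom_available_seats_page_py total_seats booked_set offset limit → Pre_available_seats_page_py total_seats booked_set offset limit → Spec_available_seats_page_py total_seats booked_set offset limit (available_seats_page_py total_seats booked_set offset limit)

-- ===== LEMMAS AND PROOFS =====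

-- proof-side list counterparts of the two lazy counter loops (the loops walk
-- pyRange lists here; bridge lemmas identify them with the ports)
def pvAList (booked_set : List Int) (offset limit : Int) :
    List Int → Int → List Int → List Int
  | [], _, results => results
  | seat :: rest, skipped, results =>
    if seat ∈ booked_set then pvAList booked_set offset limit rest skipped results
    else if skipped < offset then pvAList booked_set offset limit rest (skipped + 1) results
    else
      let results' := results ++ [seat]
      if limit ≤ (results'.length : Int) then results'
      else pvAList booked_set offset limit rest skipped results'

def pvBEmitList (limit : Int) : List Int → List Int → List Int × Bool
  | [], results => (results, false)
  | s :: t, results =>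
    let results' := results ++ [s]
    if limit ≤ (results'.length : Int) then (results', true)
    else pvBEmitList limit t results'

lemma pvALoop_eq_list (booked_set : List Int) (offset limit stop seat skipped : Int)
    (results : List Int) :
    pvALoop booked_set offset limit stop seat skipped results =
      pvAList booked_set offset limit (PySem.List.pyRange seat stop 1) skipped results := by
  rw [pvALoop]
  by_cases h : seat < stop
  · rw [dif_pos h, PySem.List.pyRange_one_cons h]
    simp only [pvAList]
    by_cases hb : seat ∈ booked_set
    · rw [if_pos hb, if_pos hb, pvALoop_eq_list]
    · rw [if_neg hb, if_neg hb]
      by_cases hsk : skipped < offset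
      · rw [if_pos hsk, if_pos hsk, pvALoop_eq_list]
      · rw [if_neg hsk, if_neg hsk]
        by_cases hl : limit ≤ ((results ++ [seat]).length : Int)
        · rw [if_pos hl, if_pos hl]
        · rw [if_neg hl, if_neg hl, pvALoop_eq_list]
  · rw [dif_neg h, PySem.List.pyRange_one_eq_nil (by omega)]
    simp [pvAList]
termination_by (stop - seat).toNat
decreasing_by all_goals omega

lemma pvBEmit_eq_list (limit b s : Int) (results : List Int) :
    pvBEmit limit b s results =
      pvBEmitList limit (PySem.List.pyRange s b 1) results := by
  rw [pvBEmit]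
  by_cases h : s < b
  · rw [dif_pos h, PySem.List.pyRange_one_cons h]
    simp only [pvBEmitList]
    by_cases hl : limit ≤ ((results ++ [s]).length : Int)
    · rw [if_pos hl, if_pos hl]
    · rw [if_neg hl, if_neg hl, pvBEmit_eq_list]
  · rw [dif_neg h, PySem.List.pyRange_one_eq_nil (by omega)]
    simp [pvBEmitList]
termination_by (b - s).toNat
decreasing_by omega

-- the common closed form both loops compute: the free seats of 1..total, after dropping
-- max(offset,0) of them, truncated to max(limit,1) many (A appends before testing the limit,
-- so even limit ≤ 0 yields one seat; B's inner loop has the same append-then-test shape)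
def pvFree (total_seats : Int) (booked_set : List Int) : List Int :=
  (PySem.List.pyRange 1 (total_seats + 1) 1).filter (fun s => !decide (s ∈ booked_set))

def pvN (limit : Int) : Nat := (max limit 1).toNat

lemma pvN_pos (limit : Int) : 0 < pvN limit := by
  unfold pvN; omega

-- A's emit phase
lemma pvAList_emit (booked_set : List Int) (offset limit : Int)
    (seats : List Int) (skipped : Int) (results : List Int)
    (hsk : offset ≤ skipped) (hlen : results.length < pvN limit) :
    pvAList booked_set offset limit seats skipped results =
      results ++ (seats.filter (fun s => !decide (s ∈ booked_set))).take (pvN limit - results.length) := by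
  induction seats generalizing results with
  | nil => simp [pvAList]
  | cons s rest ih =>
    simp only [pvAList]
    by_cases hb : s ∈ booked_set
    · rw [if_pos hb, List.filter_cons_of_neg (by simp [hb]), ih results hlen]
    · have hns : ¬ skipped < offset := by omega
      rw [if_neg hb, if_neg hns, List.filter_cons_of_pos (by simp [hb])]
      by_cases hl : limit ≤ ((results ++ [s]).length : Int)
      · rw [if_pos hl]
        have hN : pvN limit - results.length = 1 := by
          simp only [List.length_append, List.length_cons, List.length_nil] at hl
          unfold pvN at hlen ⊢; omega
        rw [hN]; simp
      · rw [if_neg hl]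
        have hlen' : (results ++ [s]).length < pvN limit := by
          simp only [List.length_append, List.length_cons, List.length_nil] at hl ⊢
          unfold pvN at hlen ⊢; omega
        rw [ih (results ++ [s]) hlen']
        have hN : pvN limit - results.length = (pvN limit - (results ++ [s]).length) + 1 := by
          simp only [List.length_append, List.length_cons, List.length_nil] at hlen' ⊢
          omega
        rw [hN, List.take_succ_cons]
        simp

-- A's whole loop from an empty accumulator: skip phase then emit phase
lemma pvAList_skip (booked_set : List Int) (offset limit : Int)
    (seats : List Int) (skipped : Int) :
    pvAList booked_set offset limit seats skipped [] =
      ((seats.filter (fun s => !decide (s ∈ booked_set))).drop (offset - skipped).toNat).take (pvN limit) := by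
  induction seats generalizing skipped with
  | nil => simp [pvAList]
  | cons s rest ih =>
    simp only [pvAList]
    by_cases hb : s ∈ booked_set
    · rw [if_pos hb, List.filter_cons_of_neg (by simp [hb]), ih skipped]
    · rw [if_neg hb, List.filter_cons_of_pos (by simp [hb])]
      by_cases hsk : skipped < offset
      · rw [if_pos hsk, ih (skipped + 1)]
        have h1 : (offset - skipped).toNat = (offset - (skipped + 1)).toNat + 1 := by omega
        rw [h1, List.drop_succ_cons]
      · rw [if_neg hsk]
        have h0 : (offset - skipped).toNat = 0 := by omega
        rw [h0, List.drop_zero]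
        by_cases hl : limit ≤ ((([] : List Int) ++ [s]).length : Int)
        · rw [if_pos hl]
          have hN : pvN limit = 1 := by
            simp only [List.nil_append, List.length_cons, List.length_nil] at hl
            unfold pvN; omega
          rw [hN]; simp
        · rw [if_neg hl]
          have hlen' : (([] : List Int) ++ [s]).length < pvN limit := by
            simp only [List.nil_append, List.length_cons, List.length_nil] at hl ⊢
            unfold pvN; omega
          rw [pvAList_emit booked_set offset limit rest skipped _ (by omega) hlen']
          have hN : pvN limit = (pvN limit - (([] : List Int) ++ [s]).length) + 1 := by
            simp only [List.nil_append, List.length_cons, List.length_nil] at hlen' ⊢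
            omega
          rw [hN, List.take_succ_cons]
          simp

lemma pvA_closed (total_seats : Int) (booked_set : List Int) (offset limit : Int) :
    available_seats_page_py total_seats booked_set offset limit =
      ((pvFree total_seats booked_set).drop offset.toNat).take (pvN limit) := by
  unfold available_seats_page_py pvFree
  rw [pvALoop_eq_list, pvAList_skip]
  norm_num

-- B's inner loop
lemma pvBEmitList_spec (limit : Int) (g results : List Int)
    (hlen : results.length < pvN limit) :
    pvBEmitList limit g results =
      (results ++ g.take (pvN limit - results.length),
       decide (pvN limit - results.length ≤ g.length)) := by
  induction g generalizing results with
  | nil =>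
    have h : ¬ (pvN limit - results.length = 0) := by omega
    simp [pvBEmitList, h]
  | cons s t ih =>
    simp only [pvBEmitList]
    by_cases hl : limit ≤ ((results ++ [s]).length : Int)
    · rw [if_pos hl]
      have hN : pvN limit - results.length = 1 := by
        simp only [List.length_append, List.length_cons, List.length_nil] at hl
        unfold pvN at hlen ⊢; omega
      have h2 : pvN limit - results.length ≤ (s :: t).length := by
        rw [hN]; simp
      rw [hN]
      simp [h2, hN]
    · rw [if_neg hl]
      have hlen' : (results ++ [s]).length < pvN limit := by
        simp only [List.length_append, List.length_cons, List.length_nil] at hl ⊢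
        unfold pvN at hlen ⊢; omega
      rw [ih _ hlen']
      have hN : pvN limit - results.length = (pvN limit - (results ++ [s]).length) + 1 := by
        simp only [List.length_append, List.length_cons, List.length_nil] at hlen' ⊢
        omega
      rw [hN, List.take_succ_cons]
      refine Prod.ext (by simp) ?_
      simp only [List.length_cons, List.length_append, List.length_nil] at hlen' ⊢
      rw [decide_eq_decide]
      omega

-- the free seats described by a gap decomposition: seats strictly between prev and the
-- successive booked seats
def pvGaps : List Int → Int → List Int
  | [], _ => []
  | b :: rest, prev => PySem.List.pyRange (prev + 1) b 1 ++ pvGaps rest b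

-- B's outer loop computes the closed form over the gap decomposition
lemma pvBLoop_spec (limit : Int) (bl : List Int) (prev to_skip : Int) (results : List Int)
    (hts : 0 ≤ to_skip) (hlen : results.length < pvN limit)
    (hgt : ∀ b ∈ bl, prev < b) (hsort : bl.Pairwise (· < ·)) :
    pvBLoop limit bl prev to_skip results =
      results ++ ((pvGaps bl prev).drop to_skip.toNat).take (pvN limit - results.length) := by
  induction bl generalizing prev to_skip results with
  | nil => simp [pvBLoop, pvGaps]
  | cons b rest ih =>
    have hpb : prev < b := hgt b (List.mem_cons_self ..)
    have hrest_gt : ∀ x ∈ rest, b < x := by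
      intro x hx; exact (List.pairwise_cons.mp hsort).1 x hx
    have hsort' : rest.Pairwise (· < ·) := (List.pairwise_cons.mp hsort).2
    have hRlen : (PySem.List.pyRange (prev + 1) b 1).length = (b - prev - 1).toNat := by
      rw [PySem.List.length_pyRange_one]; omega
    by_cases hgap : b - prev - 1 ≤ to_skip
    · simp only [pvBLoop, if_pos hgap,
        ih b (to_skip - (b - prev - 1)) results (by omega) hlen hrest_gt hsort', pvGaps]
      have hR0 : (PySem.List.pyRange (prev + 1) b 1).drop to_skip.toNat = [] :=
        List.drop_eq_nil_of_le (by rw [hRlen]; omega)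
      have hidx : to_skip.toNat - (PySem.List.pyRange (prev + 1) b 1).length =
          (to_skip - (b - prev - 1)).toNat := by rw [hRlen]; omega
      rw [List.drop_append, hR0, hidx, List.nil_append]
    · -- emit from this gap
      have hsplit : PySem.List.pyRange (prev + 1) b 1 =
          PySem.List.pyRange (prev + 1) (prev + 1 + to_skip) 1 ++
          PySem.List.pyRange (prev + 1 + to_skip) b 1 :=
        PySem.List.pyRange_one_append _ _ _ (by omega) (by omega)
      have hlen1 : (PySem.List.pyRange (prev + 1) (prev + 1 + to_skip) 1).length = to_skip.toNat := by
        rw [PySem.List.length_pyRange_one]; omega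
      have hdrop : ((pvGaps (b :: rest) prev).drop to_skip.toNat) =
          PySem.List.pyRange (prev + 1 + to_skip) b 1 ++ pvGaps rest b := by
        have hR10 : (PySem.List.pyRange (prev + 1) (prev + 1 + to_skip) 1).drop to_skip.toNat = [] :=
          List.drop_eq_nil_of_le (by rw [hlen1])
        simp only [pvGaps]
        rw [hsplit, List.append_assoc, List.drop_append, hR10, List.nil_append, hlen1,
            Nat.sub_self, List.drop_zero]
      have hglen : (PySem.List.pyRange (prev + 1 + to_skip) b 1).length = (b - prev - 1 - to_skip).toNat := by
        rw [PySem.List.length_pyRange_one]; omega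
      simp only [pvBLoop, if_neg hgap, pvBEmit_eq_list, pvBEmitList_spec limit _ results hlen]
      by_cases hbrk : pvN limit - results.length ≤ (PySem.List.pyRange (prev + 1 + to_skip) b 1).length
      · simp only [hbrk, decide_true, ite_true, if_pos]
        rw [hdrop, List.take_append, Nat.sub_eq_zero_of_le hbrk, List.take_zero,
            List.append_nil]
      · simp only [hbrk, decide_false]
        rw [if_neg (by simp)]
        have hg_all : (PySem.List.pyRange (prev + 1 + to_skip) b 1).take (pvN limit - results.length) =
            PySem.List.pyRange (prev + 1 + to_skip) b 1 :=
          List.take_of_length_le (by omega)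
        rw [hg_all]
        have hbrk' := hbrk
        rw [hglen] at hbrk'
        have hlen2 : (results ++ PySem.List.pyRange (prev + 1 + to_skip) b 1).length < pvN limit := by
          simp only [List.length_append, hglen]; omega
        rw [ih b 0 _ le_rfl hlen2 hrest_gt hsort', Int.toNat_zero, List.drop_zero,
            hdrop, List.take_append, hg_all, List.append_assoc]
        have hidx2 : pvN limit - (results ++ PySem.List.pyRange (prev + 1 + to_skip) b 1).length
            = pvN limit - results.length - (PySem.List.pyRange (prev + 1 + to_skip) b 1).length := by
          simp only [List.length_append]
          omega
        rw [hidx2]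

-- the gap decomposition (with sentinel) IS the filtered seat range
lemma pvGaps_eq_filter (total_seats : Int) (bl : List Int) (prev : Int)
    (hsort : bl.Pairwise (· < ·)) (hbnd : ∀ b ∈ bl, prev < b ∧ b ≤ total_seats) :
    pvGaps (bl ++ [total_seats + 1]) prev =
      (PySem.List.pyRange (prev + 1) (total_seats + 1) 1).filter (fun s => !decide (s ∈ bl)) := by
  induction bl generalizing prev with
  | nil =>
    simp [pvGaps, List.filter_eq_self]
  | cons b rest ih =>
    obtain ⟨hpb, hbt⟩ := hbnd b (List.mem_cons_self ..)
    have hrest_gt : ∀ x ∈ rest, b < x := by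
      intro x hx; exact (List.pairwise_cons.mp hsort).1 x hx
    have hsort' : rest.Pairwise (· < ·) := (List.pairwise_cons.mp hsort).2
    have hbnd' : ∀ x ∈ rest, b < x ∧ x ≤ total_seats := by
      intro x hx; exact ⟨hrest_gt x hx, (hbnd x (List.mem_cons_of_mem _ hx)).2⟩
    have hsplit : PySem.List.pyRange (prev + 1) (total_seats + 1) 1 =
        PySem.List.pyRange (prev + 1) b 1 ++ PySem.List.pyRange b (total_seats + 1) 1 :=
      PySem.List.pyRange_one_append _ _ _ (by omega) (by omega)
    have hsplit2 : PySem.List.pyRange b (total_seats + 1) 1 =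
        b :: PySem.List.pyRange (b + 1) (total_seats + 1) 1 :=
      PySem.List.pyRange_one_cons (by omega)
    rw [hsplit, hsplit2, List.filter_append, List.filter_cons]
    have hbmem : (b ∈ b :: rest) := List.mem_cons_self ..
    have hfirst : (PySem.List.pyRange (prev + 1) b 1).filter (fun s => !decide (s ∈ b :: rest)) =
        PySem.List.pyRange (prev + 1) b 1 := by
      rw [List.filter_eq_self]
      intro s hs
      rw [PySem.List.mem_pyRange_one] at hs
      have h1 : s ≠ b := by omega
      have h2 : s ∉ rest := fun hm => absurd (hrest_gt s hm) (by omega)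
      simp [h1, h2]
    have hthird : (PySem.List.pyRange (b + 1) (total_seats + 1) 1).filter (fun s => !decide (s ∈ b :: rest)) =
        (PySem.List.pyRange (b + 1) (total_seats + 1) 1).filter (fun s => !decide (s ∈ rest)) := by
      apply List.filter_congr
      intro s hs
      rw [PySem.List.mem_pyRange_one] at hs
      have h1 : s ≠ b := by omega
      simp [h1]
    simp only [hbmem, decide_true, Bool.not_true, ite_false, if_neg, hfirst, hthird,
      Bool.false_eq_true, not_false_eq_true]
    rw [← ih b hsort' hbnd']
    simp only [List.cons_append, pvGaps]

lemma pvB_closed (total_seats : Int) (booked_set : List Int) (offset limit : Int)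
    (hnd : booked_set.Nodup) :
    available_seats_page_py_alt total_seats booked_set offset limit =
      ((pvFree total_seats booked_set).drop offset.toNat).take (pvN limit) := by
  unfold available_seats_page_py_alt
  set bl := PySem.List.sorted (booked_set.filter (fun b => decide (1 ≤ b ∧ b ≤ total_seats))) (fun x => x) false with hbl
  show pvBLoop limit (bl ++ [total_seats + 1]) 0 (if 0 < offset then offset else 0) [] = _
  have hperm : bl.Perm (booked_set.filter (fun b => decide (1 ≤ b ∧ b ≤ total_seats))) :=
    PySem.List.sorted_perm _ _ _
  have hnd' : bl.Nodup := hperm.nodup_iff.mpr (hnd.filter _)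
  have hle : bl.Pairwise (fun a b => (fun x => x) a ≤ (fun x => x) b) :=
    PySem.List.sorted_pairwise _ _
  have hsort : bl.Pairwise (· < ·) := by
    have := List.Pairwise.and hle hnd'
    exact this.imp (fun {a b} h => lt_of_le_of_ne h.1 h.2)
  have hmem : ∀ x, x ∈ bl ↔ x ∈ booked_set ∧ 1 ≤ x ∧ x ≤ total_seats := by
    intro x
    rw [hperm.mem_iff, List.mem_filter]
    simp
  have hbnd : ∀ b ∈ bl, (0 : Int) < b ∧ b ≤ total_seats := by
    intro b hb
    have := (hmem b).mp hb
    exact ⟨by omega, this.2.2⟩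
  have hlen0 : ([] : List Int).length < pvN limit := by
    simpa using pvN_pos limit
  by_cases htot : 0 ≤ total_seats
  · rw [pvBLoop_spec limit (bl ++ [total_seats + 1]) 0 _ []
          (by split_ifs <;> omega) hlen0
          (by intro b hb
              rcases List.mem_append.mp hb with h | h
              · exact (hbnd b h).1
              · simp at h; omega)
          (by rw [List.pairwise_append]
              refine ⟨hsort, by simp, ?_⟩
              intro a ha b hb
              simp at hb; subst hb
              have := hbnd a ha; omega)]
    rw [pvGaps_eq_filter total_seats bl 0 hsort (by simpa using hbnd)]
    have hskip : (if 0 < offset then offset else 0).toNat = offset.toNat := by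
      split_ifs <;> omega
    have hfeq : ((PySem.List.pyRange (0 + 1) (total_seats + 1) 1).filter (fun s => !decide (s ∈ bl))) =
        pvFree total_seats booked_set := by
      unfold pvFree
      norm_num
      apply List.filter_congr
      intro s hs
      rw [PySem.List.mem_pyRange_one] at hs
      rw [show ((!decide (s ∈ bl)) = (!decide (s ∈ booked_set))) from ?_]
      congr 1
      rw [decide_eq_decide, hmem s]
      constructor
      · intro h; exact h.1
      · intro h; exact ⟨h, by omega, by omega⟩
    rw [hskip, hfeq]
    simp
  · -- total_seats < 0: no seats at all; both sides are []
    have hbl0 : bl = [] := by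
      have hf : booked_set.filter (fun b => decide (1 ≤ b ∧ b ≤ total_seats)) = [] := by
        rw [List.filter_eq_nil_iff]
        intro a _
        simp only [decide_eq_true_eq, not_and]
        omega
      rw [hbl, hf]
      rfl
    rw [hbl0, List.nil_append]
    have hfree : pvFree total_seats booked_set = [] := by
      unfold pvFree
      rw [PySem.List.pyRange_one_eq_nil (by omega)]
      rfl
    rw [hfree]
    simp only [pvBLoop]
    rw [if_pos (by split_ifs <;> omega)]
    simp [pvBLoop]

-- ===== VERDICT (by name: the statement is the Claim_ definition above) =====
theorem available_seats_page_py_spec : Claim_equal_available_seats_page_py := by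
  intro total_seats booked_set offset limit _hdom hpre
  unfold Spec_available_seats_page_py
  rw [pvA_closed, pvB_closed total_seats booked_set offset limit hpre]
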